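-- pv_equiv track=rewrite | github.com/marcus-deans/duke-computationalmethods | Apt4/AnagramFree.py | getMaximumSubset
-- ===== SOURCE A (Python) =====
-- def getMaximumSubset(words):
--
--     for x in range(0,(len(words))-1):
--         try:
--             m = words[x]
--         except:
--             m = 404
--             break
--         p = sorted(words[x])
--         ne = len(words)
--         y = x
--         while(y in range(0,ne)):
--             try:
--                 z = words[y+1]
--             except:
--                 z = 404
--                 break
--             y += 1
--             if((sorted(words[y])) == p)and(y!=x):
--                 words.pop(y)
--                 y = 0
--             ne = len(words)
-- #        if z == 404:
-- #            break
--     return len(words)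
-- ===== SOURCE B (Python) =====
-- def getMaximumSubset(words):
--     # One forward pass with a set of anagram signatures: keep the first word of
--     # each anagram class, mutate words in place like A does, return the count.
--     seen = set()
--     kept = []
--     for w in words:
--         sig = tuple(sorted(w))
--         if sig not in seen:
--             seen.add(sig)
--             kept.append(w)
--     words[:] = kept
--     return len(kept)
-- ===== Notes on version B (the rewrite author's own statement) =====
-- stated objective: faster
-- what changed: Replaced A's nested in-place scan-and-pop (restarting the inner scan from the front after every pop) by a single forward pass that keeps the first word of each anagram signature using a set of seen signatures.
import Mathlib
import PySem

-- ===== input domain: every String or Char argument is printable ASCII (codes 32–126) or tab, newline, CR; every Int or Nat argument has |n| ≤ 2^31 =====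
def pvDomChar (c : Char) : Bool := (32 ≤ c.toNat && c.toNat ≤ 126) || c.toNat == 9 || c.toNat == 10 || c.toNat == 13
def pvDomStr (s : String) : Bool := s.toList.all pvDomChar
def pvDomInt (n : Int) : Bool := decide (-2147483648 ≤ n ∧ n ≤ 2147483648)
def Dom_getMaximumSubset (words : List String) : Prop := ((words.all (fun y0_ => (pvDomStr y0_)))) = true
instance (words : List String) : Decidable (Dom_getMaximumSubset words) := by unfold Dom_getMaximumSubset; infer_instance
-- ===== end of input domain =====

-- B replaces A's nested scan-and-pop anagram dedup by a single pass with a set of seen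
-- signatures (objective: faster). A mutates `words` in place and B performs the same final
-- mutation in Python; the equivalence proved here is about the RETURN value.

-- ===== PORT A =====

-- sorted(w): Python's sorted over a string's characters (shared helper of both ports)
def sigOf (s : String) : List Char := PySem.List.sorted s.toList (fun c => c) false

-- A's inner while loop: state = (words, y, ne); pops anagram matches, resetting y to 0
def innerA (x : Nat) (p : List Char) (ws : List String) (y ne : Nat) : List String :=
  if y < ne then
    if ws.length ≤ y + 1 then ws
    else
      let y' := y + 1
      if sigOf (ws.getD y' "") = p ∧ y' ≠ x then
        innerA x p (ws.eraseIdx y') 0 (ws.eraseIdx y').length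
      else innerA x p ws y' ws.length
  else ws
termination_by (ws.length, ws.length - y)
decreasing_by
  · have : y + 1 < ws.length := by omega
    left; simpa [List.length_eraseIdx, this] using by omega
  · right; omega

-- A's outer for loop over range(0, len(words)-1), with its try/except breaks
def outerA (xs : List Nat) (ws : List String) : List String :=
  match xs with
  | [] => ws
  | x :: rest =>
      if ws.length ≤ x then ws
      else outerA rest (innerA x (sigOf (ws.getD x "")) ws x ws.length)

def getMaximumSubset (words : List String) : Int :=
  ((outerA (List.range (words.length - 1)) words).length : Int)

-- ===== PORT B =====

-- one forward pass: state = (seen signatures, kept words)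
def keptB (words : List String) : PySem.Set (List Char) × List String :=
  words.foldl
    (fun st w =>
      let sig := sigOf w
      if PySem.Set.contains st.1 sig then st
      else (PySem.Set.add st.1 sig, st.2 ++ [w]))
    (PySem.Set.empty, [])

def getMaximumSubset_alt (words : List String) : Int :=
  (((keptB words).2).length : Int)

-- ===== PRECONDITION & SPEC =====
def Spec_getMaximumSubset (words : List String) (out : Int) : Prop := out = getMaximumSubset_alt words
instance (words : List String) (out : Int) : Decidable (Spec_getMaximumSubset words out) := by unfold Spec_getMaximumSubset; infer_instance

-- ===== CLAIM (what is proved, stated in full; the proofs are below) =====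
def Claim_equal_getMaximumSubset : Prop := ∀ (words : List String), Dom_getMaximumSubset words → Spec_getMaximumSubset words (getMaximumSubset words)

-- ===== LEMMAS AND PROOFS =====

-- keep the first word of each anagram signature: the common denominator of both programs
def keepFirst (ws : List String) (seen : List (List Char)) : List String :=
  match ws with
  | [] => []
  | w :: t => if sigOf w ∈ seen then keepFirst t seen else w :: keepFirst t (seen ++ [sigOf w])

-- the invariant A's outer loop maintains: every position < x has a signature
-- that never reappears later in the list
def invA (x : Nat) (ws : List String) : Prop :=
  ∀ i (hi : i < x) (h : i < ws.length), ∀ w ∈ ws.drop (i+1), sigOf w ≠ sigOf ws[i]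

lemma keepFirst_filter (ws : List String) (seen : List (List Char)) (p : List Char)
    (hp : p ∈ seen) :
    keepFirst (ws.filter (fun w => !(sigOf w == p))) seen = keepFirst ws seen := by
  induction ws generalizing seen with
  | nil => rfl
  | cons w t ih =>
      rw [List.filter_cons]
      by_cases h : sigOf w = p
      · simp only [h, beq_self_eq_true, Bool.not_true, if_neg, Bool.false_eq_true,
          not_false_iff, keepFirst, hp, if_pos]
        exact ih seen hp
      · have hb : (!(sigOf w == p)) = true := by simp [h]
        rw [hb, if_pos rfl]
        simp only [keepFirst]
        split
        · exact ih seen hp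
        · exact congrArg _ (ih _ (List.mem_append_left _ hp))

lemma not_mem_sig (x : Nat) (ws : List String) (inv : invA x ws) (hx : x < ws.length) :
    sigOf ws[x] ∉ (ws.take x).map sigOf := by
  intro hmem
  rcases List.mem_map.mp hmem with ⟨a, ha, hsa⟩
  rcases List.mem_iff_getElem.mp ha with ⟨i, hi, rfl⟩
  rw [List.length_take] at hi
  have hix : i < x := by omega
  have hil : i < ws.length := by omega
  rw [List.getElem_take] at hsa
  refine inv i hix hil ws[x] ?_ hsa.symm
  refine List.mem_iff_getElem.mpr ⟨x - (i+1), ?_, ?_⟩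
  · rw [List.length_drop]; omega
  · rw [List.getElem_drop]; congr 1; omega

lemma eq_take_filter (x : Nat) (p : List Char) (ws : List String)
    (h : ∀ j (hj : j < ws.length), x < j → sigOf ws[j] ≠ p) :
    ws = ws.take (x+1) ++ (ws.drop (x+1)).filter (fun w => !(sigOf w == p)) := by
  conv_lhs => rw [← List.take_append_drop (x+1) ws]
  congr 1
  refine (List.filter_eq_self.mpr ?_).symm
  intro a ha
  rcases List.mem_iff_getElem.mp ha with ⟨i, hi, rfl⟩
  rw [List.getElem_drop]
  have hlen : x + 1 + i < ws.length := by
    rw [List.length_drop] at hi; omega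
  simpa using h (x+1+i) hlen (by omega)

-- A's inner loop removes exactly the anagram matches strictly after position x,
-- provided no position < x (and none in (x, y]) matches p
lemma inner_spec (x : Nat) (p : List Char) :
    ∀ ws y ne, ne = ws.length →
    (∀ j (h : j < ws.length), j < x → sigOf ws[j] ≠ p) →
    (∀ j (h : j < ws.length), x < j → j ≤ y → sigOf ws[j] ≠ p) →
    innerA x p ws y ne =
      ws.take (x+1) ++ (ws.drop (x+1)).filter (fun w => !(sigOf w == p)) := by
  intro ws y ne
  fun_induction innerA x p ws y ne with
  | case1 ws y ne hy hbreak =>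
      intro hne h1 h2
      exact eq_take_filter x p ws (fun j hj hx => h2 j hj hx (by omega))
  | case2 ws y ne hy hlt y' hcond ih =>
      intro hne h1 h2
      obtain ⟨hsig, hneq⟩ := hcond
      have hylen : y' < ws.length := by omega
      rw [List.getD_eq_getElem ws "" hylen] at hsig
      have hgt : x < y' := by
        rcases Nat.lt_trichotomy y' x with h | h | h
        · exact absurd hsig (h1 y' hylen h)
        · exact absurd h hneq
        · exact h
      rw [ih rfl
        (fun j hj hx => by
          have hj' : j < ws.length := by
            rw [List.length_eraseIdx] at hj
            simp only [hylen, if_pos] at hj; omega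
          rw [List.getElem_eraseIdx_of_lt hj (by omega)]
          exact h1 j hj' hx)
        (fun j hj hx hle => by omega)]
      -- both sides equal take(x+1) ws ++ filter(mid) ++ filter(tail)
      rw [List.eraseIdx_eq_take_drop_succ]
      have hxy : x + 1 ≤ (ws.take y').length := by
        rw [List.length_take]; omega
      rw [List.take_append_of_le_length hxy, List.take_take,
          List.drop_append_of_le_length hxy, List.filter_append,
          List.drop_take]
      have hmin : min (x+1) y' = x + 1 := by omega
      rw [hmin]
      -- now rewrite RHS's drop (x+1) ws
      have hdecomp : ws.drop (x+1) =
          (ws.drop (x+1)).take (y' - (x+1)) ++ ws[y'] :: ws.drop (y'+1) := by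
        conv_lhs => rw [← List.take_append_drop (y' - (x+1)) (ws.drop (x+1))]
        congr 1
        rw [List.drop_drop]
        have heq : x + 1 + (y' - (x+1)) = y' := by omega
        rw [heq, List.drop_eq_getElem_cons hylen]
      conv_rhs => rw [hdecomp]
      rw [List.filter_append, List.filter_cons]
      simp [hsig]
  | case3 ws y ne hy hlt y' hcond ih =>
      intro hne h1 h2
      refine ih rfl h1 (fun j hj hx hle => ?_)
      rcases Nat.lt_or_ge j y' with h | h
      · exact h2 j hj hx (by omega)
      · have hj' : j = y' := by omega
        have hxne : y' ≠ x := by omega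
        have hnp : ¬ sigOf (ws.getD y' "") = p := fun hp => hcond ⟨hp, hxne⟩
        rw [List.getD_eq_getElem ws "" (by omega : y' < ws.length)] at hnp
        subst hj'; exact hnp
  | case4 ws y ne hy =>
      intro hne h1 h2
      exact eq_take_filter x p ws (fun j hj hx => h2 j hj hx (by omega))

-- A's outer loop, started at stage x under the invariant, keeps the prefix and
-- performs a keep-first dedup of the rest
lemma outer_spec : ∀ m x ws, invA x ws → ws.length ≤ x + m + 1 →
    outerA (List.range' x m) ws =
      ws.take x ++ keepFirst (ws.drop x) ((ws.take x).map sigOf) := by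
  intro m
  induction m with
  | zero =>
      intro x ws inv hlen
      show ws = _
      by_cases hle : ws.length ≤ x
      · rw [List.take_of_length_le hle, List.drop_eq_nil_of_le hle]
        simp [keepFirst]
      · have hlt : x < ws.length := by omega
        have hlx : ws.length = x + 1 := by omega
        rw [List.drop_eq_getElem_cons hlt]
        have hnil : ws.drop (x+1) = [] := List.drop_eq_nil_of_le (by omega)
        rw [hnil]
        simp only [keepFirst, not_mem_sig x ws inv hlt, if_neg, not_false_iff]
        rw [← List.take_succ_eq_append_getElem hlt, List.take_of_length_le (by omega)]
  | succ m ih =>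
      intro x ws inv hlen
      rw [List.range'_succ]
      show (if ws.length ≤ x then ws
        else outerA (List.range' (x+1) m) (innerA x (sigOf (ws.getD x "")) ws x ws.length)) = _
      by_cases hle : ws.length ≤ x
      · rw [if_pos hle, List.take_of_length_le hle, List.drop_eq_nil_of_le hle]
        simp [keepFirst]
      · have hlt : x < ws.length := by omega
        rw [if_neg (by omega), List.getD_eq_getElem ws "" hlt]
        set p := sigOf ws[x] with hp
        rw [inner_spec x p ws x ws.length rfl
          (fun j hj hjx => by
            have hmem : ws[x] ∈ ws.drop (j+1) := by
              refine List.mem_iff_getElem.mpr ⟨x - (j+1), ?_, ?_⟩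
              · rw [List.length_drop]; omega
              · rw [List.getElem_drop]; congr 1; omega
            exact fun hq => inv j hjx hj ws[x] hmem hq.symm)
          (fun j hj hxj hjx => by omega)]
        set mid := (ws.drop (x+1)).filter (fun w => !(sigOf w == p)) with hmid
        set ws' := ws.take (x+1) ++ mid with hws'
        have htlen : (ws.take (x+1)).length = x + 1 := by
          rw [List.length_take]; omega
        have hlen' : ws'.length ≤ (x+1) + m + 1 := by
          have h1 : mid.length ≤ (ws.drop (x+1)).length := List.length_filter_le _ _
          rw [List.length_drop] at h1
          simp only [hws', List.length_append, htlen]; omega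
        have inv' : invA (x+1) ws' := by
          intro k hk hkl w hw hq
          have hkx : k ≤ x := by omega
          have hkw : k < ws.length := by omega
          have hget : ws'[k]'hkl = ws[k]'hkw := by
            simp only [hws']
            rw [List.getElem_append_left (by rw [htlen]; omega), List.getElem_take]
          rw [hget] at hq
          rw [hws', List.drop_append_of_le_length (by rw [htlen]; omega)] at hw
          rcases List.mem_append.mp hw with hw' | hw'
          · rcases Nat.lt_or_ge k x with hkx' | hkx'
            · have hmem : w ∈ ws.drop (k+1) := by
                rw [List.drop_take] at hw'
                exact List.mem_of_mem_take hw'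
              exact inv k hkx' hkw w hmem hq
            · have hkeq : k = x := by omega
              subst hkeq
              rw [List.drop_eq_nil_of_le (by rw [htlen])] at hw'
              exact absurd hw' (List.not_mem_nil)
          · have hwmem := List.mem_filter.mp hw'
            have hwp : sigOf w ≠ p := by simpa using hwmem.2
            rcases Nat.lt_or_ge k x with hkx' | hkx'
            · have hmem : w ∈ ws.drop (k+1) := by
                have h0 := hwmem.1
                rw [show x + 1 = (k+1) + (x - k) by omega] at h0
                rw [← List.drop_drop] at h0
                exact List.mem_of_mem_drop h0
              exact inv k hkx' hkw w hmem hq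
            · have hkeq : k = x := by omega
              subst hkeq
              exact hwp (hq.trans hp.symm)
        rw [ih (x+1) ws' inv' hlen']
        have e1 : ws'.take (x+1) = ws.take (x+1) := by
          rw [hws', List.take_append_of_le_length (by rw [htlen]), List.take_take, Nat.min_self]
        have e2 : ws'.drop (x+1) = mid := by
          rw [hws', List.drop_append_of_le_length (by rw [htlen]),
              List.drop_eq_nil_of_le (by rw [htlen]), List.nil_append]
        rw [e1, e2, List.take_succ_eq_append_getElem hlt, List.map_append,
            List.drop_eq_getElem_cons hlt]
        simp only [keepFirst, not_mem_sig x ws inv hlt, if_neg, not_false_iff, List.map_cons,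
          List.map_nil]
        rw [hmid, keepFirst_filter _ _ _ (by simp [hp]), List.append_assoc]
        rfl

-- B's fold is keepFirst with an accumulator
lemma keptB_spec : ∀ (ws : List String) (seen : List (List Char)) (acc : List String),
    (ws.foldl
      (fun st w =>
        let sig := sigOf w
        if PySem.Set.contains st.1 sig then st
        else (PySem.Set.add st.1 sig, st.2 ++ [w]))
      (seen, acc)).2 = acc ++ keepFirst ws seen := by
  intro ws
  induction ws with
  | nil => simp [keepFirst]
  | cons w t ih =>
      intro seen acc
      rw [List.foldl_cons]
      by_cases h : sigOf w ∈ seen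
      · have hstep : (let sig := sigOf w;
            if PySem.Set.contains (seen, acc).1 sig = true then (seen, acc)
            else (PySem.Set.add (seen, acc).1 sig, (seen, acc).2 ++ [w]))
            = ((seen, acc) : PySem.Set (List Char) × List String) := by
          simp [PySem.Set.contains, h]
        rw [hstep, ih]
        simp [keepFirst, h]
      · have hstep : (let sig := sigOf w;
            if PySem.Set.contains (seen, acc).1 sig = true then (seen, acc)
            else (PySem.Set.add (seen, acc).1 sig, (seen, acc).2 ++ [w]))
            = ((seen ++ [sigOf w], acc ++ [w]) : PySem.Set (List Char) × List String) := by
          simp [PySem.Set.contains, PySem.Set.add, h]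
        rw [hstep, ih]
        simp [keepFirst, h]

-- ===== VERDICT (by name: the statement is the Claim_ definition above) =====
theorem getMaximumSubset_spec : Claim_equal_getMaximumSubset := by
  intro words _
  unfold Spec_getMaximumSubset getMaximumSubset getMaximumSubset_alt keptB
  rw [keptB_spec words PySem.Set.empty []]
  have ha := outer_spec (words.length - 1) 0 words (fun i hi => by omega) (by omega)
  simp only [List.take_zero, List.drop_zero, List.map_nil, List.nil_append] at ha
  rw [List.range_eq_range', ha]
  simp [PySem.Set.empty]
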